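-- pv_equiv track=rewrite | github.com/Enchan1207/VCardAnalyticsEx | src/vcflib/VCardReader.py | __parse_cards
-- ===== SOURCE A (Python) =====
-- from typing import Any, Dict, List, Tuple, Union
--
-- def __parse_cards(lines:List[str]) -> List[List[str]]:
--     cards = []
--     card_buffer = []
--     in_card_data_row = False
--     for line in lines:
--         if in_card_data_row:
--             card_buffer.append(line)
--
--         if line.startswith("BEGIN:VCARD"):
--             in_card_data_row = True
--
--         if line.startswith("END:VCARD"):
--             in_card_data_row = False
--             cards.append(card_buffer)
--             card_buffer = []
--     return cards
-- ===== SOURCE B (Python) =====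
-- from typing import List
--
-- def __parse_cards(lines: List[str]) -> List[List[str]]:
--     # Boundary/slice strategy: repeatedly split off the next END:VCARD-terminated
--     # block from the remaining suffix, then take the part after its first
--     # BEGIN:VCARD marker (the END line stays in the card; a block with no
--     # BEGIN marker yields an empty card, and an unterminated tail is dropped).
--
--     def split_at_end(rest):
--         # split rest into (block up to and including the first END:VCARD line, remainder)
--         for k, line in enumerate(rest):
--             if line.startswith("END:VCARD"):
--                 return rest[:k + 1], rest[k + 1:]
--         return None
--
--     def after_begin(seg):
--         # everything after the first BEGIN:VCARD line ([] if there is none)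
--         for j, line in enumerate(seg):
--             if line.startswith("BEGIN:VCARD"):
--                 return seg[j + 1:]
--         return []
--
--     cards = []
--     rest = lines
--     while (sp := split_at_end(rest)) is not None:
--         seg, rest = sp
--         cards.append(after_begin(seg))
--     return cards
-- ===== Notes on version B (the rewrite author's own statement) =====
-- stated objective: alternative
-- what changed: Replaces A's boolean in-card flag with per-line buffer appends by a boundary/slice decomposition: repeatedly split off the next END:VCARD-terminated block from the remaining suffix and take the part after its first BEGIN:VCARD line.
import Mathlib
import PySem

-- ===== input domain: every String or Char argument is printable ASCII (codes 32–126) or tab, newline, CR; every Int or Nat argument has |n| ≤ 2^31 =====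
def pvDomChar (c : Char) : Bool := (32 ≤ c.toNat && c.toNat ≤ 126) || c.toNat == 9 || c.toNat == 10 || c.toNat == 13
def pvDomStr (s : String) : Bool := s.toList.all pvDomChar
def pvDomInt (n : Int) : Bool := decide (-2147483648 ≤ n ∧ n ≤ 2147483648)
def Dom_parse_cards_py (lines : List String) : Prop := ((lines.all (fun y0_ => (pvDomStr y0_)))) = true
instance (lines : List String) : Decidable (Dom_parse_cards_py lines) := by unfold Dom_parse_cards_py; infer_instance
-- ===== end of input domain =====

-- B replaces A's boolean-flag line-by-line accumulator by a boundary/slice decomposition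
-- (split off each END:VCARD-terminated block, slice it after its first BEGIN:VCARD);
-- objective: alternative decomposition, same linear cost.


-- ===== PORT A =====
-- state: (cards, card_buffer, in_card_data_row)
def pvAStep (st : List (List String) × List String × Bool) (line : String) :
    List (List String) × List String × Bool :=
  let cards := st.1
  let buf := if st.2.2 then st.2.1 ++ [line] else st.2.1
  let inc := if PySem.Str.startswith line "BEGIN:VCARD" then true else st.2.2
  if PySem.Str.startswith line "END:VCARD" then (cards ++ [buf], [], false)
  else (cards, buf, inc)

def parse_cards_py (lines : List String) : List (List String) :=
  (lines.foldl pvAStep ([], [], false)).1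

-- ===== PORT B =====
-- split rest into (block up to and including the first END:VCARD line, remainder)
def pvSplitAtEnd : List String → Option (List String × List String)
  | [] => none
  | l :: ls =>
    if PySem.Str.startswith l "END:VCARD" then some ([l], ls)
    else
      match pvSplitAtEnd ls with
      | some (seg, rest) => some (l :: seg, rest)
      | none => none

-- everything after the first BEGIN:VCARD line ([] if there is none)
def pvAfterBegin : List String → List String
  | [] => []
  | l :: ls => if PySem.Str.startswith l "BEGIN:VCARD" then ls else pvAfterBegin ls

theorem pvSplitAtEnd_rest_lt : ∀ (xs seg rest : List String),
    pvSplitAtEnd xs = some (seg, rest) → rest.length < xs.length := by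
  intro xs
  induction xs with
  | nil => intro seg rest h; simp [pvSplitAtEnd] at h
  | cons l ls ih =>
    intro seg rest h
    simp only [pvSplitAtEnd] at h
    split at h
    · simp at h
      obtain ⟨-, h2⟩ := h
      subst h2; simp
    · cases hs : pvSplitAtEnd ls with
      | none => rw [hs] at h; simp at h
      | some p =>
        rw [hs] at h
        cases p with
        | mk s r =>
          simp at h
          have := ih s r hs
          have : rest = r := h.2.symm
          subst this
          simp; omega

def parse_cards_py_alt (lines : List String) : List (List String) :=
  match h : pvSplitAtEnd lines with
  | none => []
  | some (seg, rest) => pvAfterBegin seg :: parse_cards_py_alt rest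
termination_by lines.length
decreasing_by exact pvSplitAtEnd_rest_lt lines seg rest h

-- ===== PRECONDITION & SPEC =====
def Spec_parse_cards_py (lines : List String) (out : List (List String)) : Prop := out = parse_cards_py_alt lines
instance (lines : List String) (out : List (List String)) : Decidable (Spec_parse_cards_py lines out) := by unfold Spec_parse_cards_py; infer_instance

-- ===== CLAIM (what is proved, stated in full; the proofs are below) =====
def Claim_equal_parse_cards_py : Prop := ∀ (lines : List String), Dom_parse_cards_py lines → Spec_parse_cards_py lines (parse_cards_py lines)

-- ===== LEMMAS AND PROOFS =====

-- A line cannot start with both markers.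
theorem pv_not_both (l : String) (h : PySem.Str.startswith l "END:VCARD" = true) :
    PySem.Str.startswith l "BEGIN:VCARD" = false := by
  by_contra hb
  rw [Bool.not_eq_false] at hb
  rw [PySem.Str.startswith_eq] at h hb
  rw [PySem.Chars.startswith_iff] at h hb
  rcases List.prefix_or_prefix_of_prefix h hb with h1 | h1
  · exact absurd h1 (by decide)
  · exact absurd h1 (by decide)

theorem pv_alt_unfold (lines : List String) : parse_cards_py_alt lines =
    match pvSplitAtEnd lines with
    | none => []
    | some (seg, rest) => pvAfterBegin seg :: parse_cards_py_alt rest := by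
  rw [parse_cards_py_alt]
  split <;> rename_i heq <;> rw [heq]

-- main invariant relating A's flag/accumulator state to B's block splitting
theorem pv_main : ∀ (ls : List String),
    (∀ c : List (List String), (ls.foldl pvAStep (c, [], false)).1 = c ++ parse_cards_py_alt ls)
    ∧ (∀ (c : List (List String)) (buf : List String),
        (ls.foldl pvAStep (c, buf, true)).1 =
          c ++ (match pvSplitAtEnd ls with
                | none => []
                | some (seg, rest) => (buf ++ seg) :: parse_cards_py_alt rest)) := by
  intro ls
  induction ls with
  | nil =>
    refine ⟨fun c => ?_, fun c buf => ?_⟩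
    · simp [pv_alt_unfold, pvSplitAtEnd]
    · simp [pvSplitAtEnd]
  | cons l ls ih =>
    obtain ⟨ih1, ih2⟩ := ih
    by_cases he : PySem.Str.startswith l "END:VCARD" = true
    · have hb := pv_not_both l he
      simp at he hb
      refine ⟨fun c => ?_, fun c buf => ?_⟩
      · rw [pv_alt_unfold (l :: ls)]
        simp [pvAStep, pvSplitAtEnd, pvAfterBegin, he, hb, ih1]
      · simp [pvAStep, pvSplitAtEnd, he, ih1]
    · rw [Bool.not_eq_true] at he
      simp at he
      by_cases hbg : PySem.Str.startswith l "BEGIN:VCARD" = true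
      · simp at hbg
        refine ⟨fun c => ?_, fun c buf => ?_⟩
        · rw [pv_alt_unfold (l :: ls)]
          cases hs : pvSplitAtEnd ls with
          | none => simp [pvAStep, pvSplitAtEnd, he, hbg, hs, ih2]
          | some p =>
            cases p with
            | mk seg rest => simp [pvAStep, pvSplitAtEnd, pvAfterBegin, he, hbg, hs, ih2]
        · cases hs : pvSplitAtEnd ls with
          | none => simp [pvAStep, pvSplitAtEnd, he, hbg, hs, ih2]
          | some p =>
            cases p with
            | mk seg rest => simp [pvAStep, pvSplitAtEnd, he, hbg, hs, ih2]
      · rw [Bool.not_eq_true] at hbg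
        simp at hbg
        refine ⟨fun c => ?_, fun c buf => ?_⟩
        · rw [pv_alt_unfold (l :: ls)]
          cases hs : pvSplitAtEnd ls with
          | none => simp [pvAStep, pvSplitAtEnd, he, hbg, hs, ih1, pv_alt_unfold ls]
          | some p =>
            cases p with
            | mk seg rest =>
              simp [pvAStep, pvSplitAtEnd, pvAfterBegin, he, hbg, hs, ih1, pv_alt_unfold ls]
        · cases hs : pvSplitAtEnd ls with
          | none => simp [pvAStep, pvSplitAtEnd, he, hbg, hs, ih2]
          | some p =>
            cases p with
            | mk seg rest => simp [pvAStep, pvSplitAtEnd, he, hbg, hs, ih2]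

-- ===== VERDICT (by name: the statement is the Claim_ definition above) =====
theorem parse_cards_py_spec : Claim_equal_parse_cards_py := by
  intro lines _
  unfold Spec_parse_cards_py parse_cards_py
  simpa using (pv_main lines).1 []
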